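-- pv_equiv track=rewrite | github.com/ghghdfd/Python_coding | 08_03/programmes_소수만들기.py | solution
-- ===== SOURCE A (Python) =====
-- from itertools import combinations
-- import math
--
-- def check(s):
--     for i in range(2,int(math.sqrt(s))+1):
--         if s % i == 0:
--             return False
--     return True
--
-- def solution(nums):
--     answer=0
--     nums_=list(combinations(nums, 3))
--     nums_=list([sum(i) for i in nums_])
--
--     for i in nums_:
--         if check(i):
--             answer+=1
--
--     return answer
-- ===== SOURCE B (Python) =====
-- import math
--
--
-- def check(s):
--     for i in range(2, int(math.sqrt(s)) + 1):
--         if s % i == 0: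
--             return False
--     return True
--
--
-- def solution(nums):
--     # Incremental pass from the right: pair_sums counts the sums of all 2-element
--     # combinations among the elements already processed; each new element x closes
--     # those pairs into triples, so we test x+s once per DISTINCT pair sum and add
--     # its multiplicity.  No triple is ever materialised.
--     total = 0
--     pair_sums = {}
--     seen = []
--     for x in reversed(nums):
--         for s, c in pair_sums.items():
--             if check(x + s):
--                 total += c
--         for y in seen:
--             k = x + y
--             pair_sums[k] = pair_sums.get(k, 0) + 1
--         seen.append(x)
--     return total
-- ===== Notes on version B (the rewrite author's own statement) =====
-- stated objective: alternative
-- what changed: B never materialises the triples: it makes one pass (from the right) maintaining a frequency dict of pair sums among the elements already seen, and each new element closes those pairs into triples, testing primality once per distinct pair sum and adding its multiplicity.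
import Mathlib
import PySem

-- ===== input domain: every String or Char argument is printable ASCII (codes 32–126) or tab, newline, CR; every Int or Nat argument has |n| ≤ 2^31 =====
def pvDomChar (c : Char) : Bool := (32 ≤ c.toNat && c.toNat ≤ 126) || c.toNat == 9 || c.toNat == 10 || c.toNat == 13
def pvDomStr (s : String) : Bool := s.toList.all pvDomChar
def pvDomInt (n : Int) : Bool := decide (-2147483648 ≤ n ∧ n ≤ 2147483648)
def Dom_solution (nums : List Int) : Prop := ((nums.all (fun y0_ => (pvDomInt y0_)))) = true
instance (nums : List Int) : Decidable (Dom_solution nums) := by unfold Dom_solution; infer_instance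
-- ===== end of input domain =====

-- B replaces A's enumerate-all-triples-and-test pass by a single right-to-left pass that
-- maintains a frequency dict of pair sums and closes pairs into triples (alternative algorithm, same result).

-- ===== PORT A =====
-- check(s) for s ≥ 0 (the Pre_ domain): the trial-division loop with early 'return False' is 'all'.
-- int(math.sqrt(s)) is ported as Nat.sqrt: for s ≥ 0 the two bounds differ at most by the divisor
-- isqrt(s)+1, which can only divide s when a smaller divisor already did, so the result is identical.
def check (s : Int) : Bool :=
  (PySem.List.pyRange 2 (Int.ofNat (Nat.sqrt s.toNat) + 1) 1).all
    (fun i => !(PySem.Int.mod s i == 0))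

def solution (nums : List Int) : Int :=
  let nums1 := PySem.List.combinations nums 3
  let sums := nums1.map (fun i => i.sum)
  sums.foldl (fun answer i => if check i then answer + 1 else answer) 0

-- ===== PORT B =====
-- 'for x in reversed(nums)' is List.foldr; the state is (total, pair_sums, seen).
def solution_alt (nums : List Int) : Int :=
  (nums.foldr
    (fun x st =>
      let total := st.2.1.items.foldl (fun t p => if check (x + p.1) then t + p.2 else t) st.1
      let ps := st.2.2.foldl (fun d y => d.insert (x + y) (d.getD (x + y) 0 + 1)) st.2.1
      (total, ps, st.2.2 ++ [x]))
    ((0 : Int), (PySem.Dict.empty : PySem.Dict Int Int), ([] : List Int))).1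

-- ===== PRECONDITION & SPEC =====
-- Pre_ excludes exactly the inputs with a negative 3-combination sum, on which A (and B) raise
-- ValueError via math.sqrt of a negative number.
def Pre_solution (nums : List Int) : Prop :=
  ∀ c ∈ PySem.List.combinations nums 3, 0 ≤ c.sum
instance (nums : List Int) : Decidable (Pre_solution nums) := by unfold Pre_solution; infer_instance
def pvWitness_solution : List Int := [1, 2, 4, 6]

def Spec_solution (nums : List Int) (out : Int) : Prop := out = solution_alt nums
instance (nums : List Int) (out : Int) : Decidable (Spec_solution nums out) := by unfold Spec_solution; infer_instance

-- ===== CLAIM (what is proved, stated in full; the proofs are below) =====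
def Claim_equal_solution : Prop := ∀ (nums : List Int), Dom_solution nums → Pre_solution nums → Spec_solution nums (solution nums)

-- ===== LEMMAS AND PROOFS =====
def pairsums (xs : List Int) : List Int := (PySem.List.combinations xs 2).map List.sum
def triplesums (xs : List Int) : List Int := (PySem.List.combinations xs 3).map List.sum

-- B's loop body and state, named for the proofs (definitionally the foldr in solution_alt).
def stepB (x : Int) (st : Int × PySem.Dict Int Int × List Int) : Int × PySem.Dict Int Int × List Int :=
  let total := st.2.1.items.foldl (fun t p => if check (x + p.1) then t + p.2 else t) st.1
  let ps := st.2.2.foldl (fun d y => d.insert (x + y) (d.getD (x + y) 0 + 1)) st.2.1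
  (total, ps, st.2.2 ++ [x])

def stateB (xs : List Int) : Int × PySem.Dict Int Int × List Int :=
  xs.foldr stepB ((0 : Int), (PySem.Dict.empty : PySem.Dict Int Int), ([] : List Int))

theorem pairsums_cons (x : Int) (xs : List Int) :
    pairsums (x :: xs) = xs.map (fun y => x + y) ++ pairsums xs := by
  unfold pairsums
  rw [PySem.List.combinations_cons_succ, PySem.List.combinations_one]
  simp [List.map_map, Function.comp]

theorem triplesums_cons (x : Int) (xs : List Int) :
    triplesums (x :: xs) = (pairsums xs).map (fun s => x + s) ++ triplesums xs := by
  unfold triplesums pairsums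
  rw [PySem.List.combinations_cons_succ]
  simp [List.map_map, Function.comp]

theorem sum_counts_filter (p : Int → Bool) (K L : List Int) (hK : K.Nodup)
    (hmem : ∀ k, k ∈ K ↔ k ∈ L) :
    ((K.filter p).map (fun k => (L.count k : Int))).sum = (L.countP p : Int) := by
  have hperm : K.Perm L.dedup := by
    refine (List.perm_ext_iff_of_nodup hK (List.nodup_dedup L)).2 ?_
    intro a
    rw [List.mem_dedup]
    exact hmem a
  have h2 := ((hperm.filter p).map (fun k => (L.count k : Int))).sum_eq
  rw [h2]
  have h3 := List.sum_map_count_dedup_filter_eq_countP p L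
  have : ((L.dedup.filter p).map (fun k => (L.count k : Int))).sum
      = (((L.dedup.filter p).map (fun k => L.count k)).sum : Int) := by
    induction (L.dedup.filter p) with
    | nil => simp
    | cons a t ih => simp [ih]
  rw [this, h3]

theorem stateB_inv (xs : List Int) :
    (stateB xs).2.2 = xs.reverse ∧
    (stateB xs).2.1.keys.Nodup ∧
    (∀ v, (stateB xs).2.1.getD v 0 = ((pairsums xs).count v : Int)) ∧
    (∀ v, v ∈ (stateB xs).2.1.keys ↔ v ∈ pairsums xs) ∧
    (stateB xs).1 = ((triplesums xs).countP check : Int) := by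
  induction xs with
  | nil =>
    refine ⟨rfl, ?_, ?_, ?_, ?_⟩ <;>
      simp [stateB, pairsums, triplesums, PySem.Dict.keys_empty, PySem.Dict.getD_empty,
        PySem.List.combinations_nil_succ]
  | cons x xs ih =>
    obtain ⟨hseen, hnd, hgetD, hkeys, htot⟩ := ih
    have hstep : stateB (x :: xs) = stepB x (stateB xs) := rfl
    set t := (stateB xs).1 with ht
    set d := (stateB xs).2.1 with hd
    set s := (stateB xs).2.2 with hs
    -- the dict update loop, rewritten as a loop over the mapped keys
    have hfold : s.foldl (fun d y => d.insert (x + y) (d.getD (x + y) 0 + 1)) d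
        = (s.map (fun y => x + y)).foldl (fun d z => d.insert z (d.getD z 0 + 1)) d := by
      rw [List.foldl_map]
    refine ⟨?_, ?_, ?_, ?_, ?_⟩
    · -- seen
      rw [hstep]; show s ++ [x] = (x :: xs).reverse
      rw [hseen, List.reverse_cons]
    · -- keys Nodup
      rw [hstep]; show (s.foldl (fun d y => d.insert (x + y) (d.getD (x + y) 0 + 1)) d).keys.Nodup
      exact PySem.Dict.nodup_keys_foldl_insert_key s (fun y => x + y) _ d hnd
    · -- getD = count
      intro v
      rw [hstep]
      show (s.foldl (fun d y => d.insert (x + y) (d.getD (x + y) 0 + 1)) d).getD v 0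
        = ((pairsums (x :: xs)).count v : Int)
      rw [hfold, PySem.Dict.getD_foldl_insert_add_one, hgetD, pairsums_cons, List.count_append,
        hseen]
      simp only [List.map_reverse, List.count_reverse]
      push_cast
      ring
    · -- keys membership
      intro v
      rw [hstep]
      show v ∈ (s.foldl (fun d y => d.insert (x + y) (d.getD (x + y) 0 + 1)) d).keys
        ↔ v ∈ pairsums (x :: xs)
      rw [PySem.Dict.keys_foldl_insert_key, pairsums_cons]
      rw [PySem.Set.mem_update]
      rw [hseen, hseen] at *
      constructor
      · rintro (h | h)
        · exact List.mem_append.2 (Or.inr ((hkeys v).1 h))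
        · exact List.mem_append.2 (Or.inl (by simpa using h))
      · intro h
        rcases List.mem_append.1 h with h | h
        · exact Or.inr (by simpa using h)
        · exact Or.inl ((hkeys v).2 h)
    · -- total
      rw [hstep]
      show d.items.foldl (fun t p => if check (x + p.1) then t + p.2 else t) t
        = ((triplesums (x :: xs)).countP check : Int)
      rw [PySem.Dict.items_eq_map_keys d hnd 0, List.foldl_map]
      have hcongr := PySem.List.foldl_congr_mem (l := d.keys) (init := t)
        (f := fun t k => if check (x + (k, d.getD k 0).1) then t + (k, d.getD k 0).2 else t)
        (g := fun t k => if check (x + k) then t + ((pairsums xs).count k : Int) else t)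
        (by intro acc k _; simp [hgetD k])
      rw [hcongr]
      rw [PySem.List.foldl_if_eq_foldl_filter (p := fun k => check (x + k))
            (f := fun t k => t + ((pairsums xs).count k : Int))]
      rw [PySem.List.foldl_add (g := fun k => ((pairsums xs).count k : Int))]
      rw [sum_counts_filter (fun k => check (x + k)) d.keys (pairsums xs) hnd hkeys]
      rw [triplesums_cons, List.countP_append, htot]
      have : (pairsums xs).countP (fun k => check (x + k))
          = ((pairsums xs).map (fun s => x + s)).countP check := by
        rw [List.countP_map]; rfl
      rw [this]
      push_cast
      ring

theorem solution_eq_alt (nums : List Int) : solution nums = solution_alt nums := by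
  have hB : solution_alt nums = (stateB nums).1 := rfl
  rw [hB, (stateB_inv nums).2.2.2.2]
  unfold solution
  simp only
  rw [PySem.List.foldl_if_add_one]
  simp [triplesums]

-- ===== VERDICT (by name: the statement is the Claim_ definition above) =====
theorem solution_spec : Claim_equal_solution := by
  intro nums _ _
  unfold Spec_solution
  exact solution_eq_alt nums
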